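-- pv_equiv track=rewrite | github.com/notKamui/M1 | Opti/TP-lpsolve/steelcut.py | find_optimized_cuts
-- ===== SOURCE A (Python) =====
-- from typing import List
--
-- def find_optimized_cuts(max: int, sizes: List[int]) -> List[List[int]]:
--     """Finds the optimal cuts for a given max size and list of sizes.
--
--     :param max: The maximum size of the steel bar.
--     :param sizes: The list of sizes to cut.
--     :return: The optimal cuts.
--     """
--     section = sizes[0]
--     maxcut = max // section
--     if len(sizes) == 1:
--         return [[maxcut]]
--     result = []
--     for i in range(maxcut + 1):
--         delta = section * i
--         values = find_optimized_cuts(max - delta, sizes[1:])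
--         for e in values:
--             e.insert(0, i)
--             result.append(e)
--     return result
-- ===== SOURCE B (Python) =====
-- from typing import List
--
-- def find_optimized_cuts(max: int, sizes: List[int]) -> List[List[int]]:
--     """Iterative breadth-wise version: an explicit worklist of
--     (remaining, prefix) partial states replaces the recursion."""
--     states = [(max, [])]
--     for size in sizes[:-1]:
--         new_states = []
--         for remaining, prefix in states:
--             for i in range(remaining // size + 1):
--                 new_states.append((remaining - size * i, prefix + [i]))
--         states = new_states
--     last = sizes[-1]
--     return [prefix + [remaining // last] for remaining, prefix in states]
-- ===== Notes on version B (the rewrite author's own statement) =====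
-- stated objective: alternative
-- what changed: Replaces the recursion over suffixes of sizes with an iterative level-by-level worklist of (remaining, prefix) partial states, processed front-to-back with ascending cut counts so the lexicographic output order is preserved.
-- outside the precondition, e.g. on find_optimized_cuts(5, [-2, 0]): A returns [], B returns []
import Mathlib
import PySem

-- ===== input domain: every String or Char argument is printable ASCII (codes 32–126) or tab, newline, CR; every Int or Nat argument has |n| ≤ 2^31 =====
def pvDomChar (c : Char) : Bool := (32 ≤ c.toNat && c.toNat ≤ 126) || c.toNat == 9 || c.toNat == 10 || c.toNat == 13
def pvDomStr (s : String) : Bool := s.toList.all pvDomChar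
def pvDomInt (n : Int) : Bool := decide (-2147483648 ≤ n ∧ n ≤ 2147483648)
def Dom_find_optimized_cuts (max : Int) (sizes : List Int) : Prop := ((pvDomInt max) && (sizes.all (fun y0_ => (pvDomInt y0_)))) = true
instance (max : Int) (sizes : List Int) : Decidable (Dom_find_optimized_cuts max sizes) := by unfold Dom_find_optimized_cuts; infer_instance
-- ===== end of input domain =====

-- B replaces A's recursion over suffixes of sizes by an iterative worklist of
-- (remaining, prefix) partial states; same outputs in the same order (A mutates
-- its intermediate lists in place, the equivalence is about the return value).


-- ===== PORT A =====
def find_optimized_cuts (max : Int) (sizes : List Int) : List (List Int) :=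
  match sizes with
  | [] => []          -- Python raises IndexError on sizes[0]; excluded by Pre_
  | section_ :: rest =>
    let maxcut := PySem.Int.floordiv max section_
    if rest = [] then [[maxcut]]
    else
      (PySem.List.pyRange 0 (maxcut + 1) 1).foldl
        (fun result i =>
          result ++ (find_optimized_cuts (max - section_ * i) rest).map (fun e => i :: e))
        []

-- ===== PORT B =====
-- one pass of B's middle loop: expand every (remaining, prefix) state by one size
def pvStep (size : Int) (states : List (Int × List Int)) : List (Int × List Int) :=
  states.foldl
    (fun new_states st =>
      new_states ++
        (PySem.List.pyRange 0 (PySem.Int.floordiv st.1 size + 1) 1).map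
          (fun i => (st.1 - size * i, st.2 ++ [i])))
    []

def find_optimized_cuts_alt (max : Int) (sizes : List Int) : List (List Int) :=
  match sizes with
  | [] => []          -- Python raises IndexError on sizes[-1]; excluded by Pre_
  | _ :: _ =>
    let states :=
      (PySem.List.slice sizes none (some (-1))).foldl (fun s sz => pvStep sz s) [(max, [])]
    let last := PySem.List.pyGetD sizes (-1) 0
    states.map (fun st => st.2 ++ [PySem.Int.floordiv st.1 last])

-- ===== PRECONDITION & SPEC =====
-- Pre_ excludes the inputs on which Python A raises: empty sizes (IndexError) and any
-- list containing 0, on which A raises ZeroDivisionError whenever that position is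
-- reached (the rare cases where an earlier empty range hides the 0, e.g. (5, [-2, 0]),
-- are excluded too; A and B both return [] there).
def Pre_find_optimized_cuts (max : Int) (sizes : List Int) : Prop :=
  sizes ≠ [] ∧ (0 : Int) ∉ sizes
instance (max : Int) (sizes : List Int) : Decidable (Pre_find_optimized_cuts max sizes) := by
  unfold Pre_find_optimized_cuts; infer_instance

def pvWitness_find_optimized_cuts : Int × List Int := (10, [3, 2])

def Spec_find_optimized_cuts (max : Int) (sizes : List Int) (out : List (List Int)) : Prop := out = find_optimized_cuts_alt max sizes
instance (max : Int) (sizes : List Int) (out : List (List Int)) : Decidable (Spec_find_optimized_cuts max sizes out) := by unfold Spec_find_optimized_cuts; infer_instance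

-- ===== CLAIM (what is proved, stated in full; the proofs are below) =====
def Claim_equal_find_optimized_cuts : Prop := ∀ (max : Int) (sizes : List Int), Dom_find_optimized_cuts max sizes → Pre_find_optimized_cuts max sizes → Spec_find_optimized_cuts max sizes (find_optimized_cuts max sizes)

-- ===== LEMMAS AND PROOFS =====

lemma pvFlatMap_pure {α β : Type} (f : α → β) (l : List α) :
    l.flatMap (fun x => [f x]) = l.map f := by
  induction l <;> simp_all

-- B's worklist, run over front ++ [last], collects exactly A's results under each state's prefix.
lemma pvStep_key (front : List Int) (last : Int) :
    ∀ (states : List (Int × List Int)),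
      (front.foldl (fun s sz => pvStep sz s) states).map
          (fun st => st.2 ++ [PySem.Int.floordiv st.1 last])
        = states.flatMap
            (fun st => (find_optimized_cuts st.1 (front ++ [last])).map (fun e => st.2 ++ e)) := by
  induction front with
  | nil =>
    intro states
    simp [find_optimized_cuts, pvFlatMap_pure]
  | cons s front' ih =>
    intro states
    have hne : front' ++ [last] ≠ [] := by simp
    simp only [List.foldl_cons, ih]
    rw [pvStep, PySem.List.foldl_append_eq_flatMap]
    simp only [List.nil_append, List.flatMap_assoc, List.flatMap_map]
    refine List.flatMap_congr ?_
    intro st _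
    show _ =
      (find_optimized_cuts st.1 (s :: (front' ++ [last]))).map (fun e => st.2 ++ e)
    rw [show find_optimized_cuts st.1 (s :: (front' ++ [last]))
          = (PySem.List.pyRange 0 (PySem.Int.floordiv st.1 s + 1) 1).foldl
              (fun result i =>
                result ++ (find_optimized_cuts (st.1 - s * i) (front' ++ [last])).map
                  (fun e => i :: e)) []
        from by rw [find_optimized_cuts]; simp [hne]]
    rw [PySem.List.foldl_append_eq_flatMap]
    simp only [List.nil_append, List.map_flatMap, List.map_map]
    refine List.flatMap_congr ?_
    intro i _
    refine List.map_congr_left ?_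
    intro e _
    simp

-- ===== VERDICT (by name: the statement is the Claim_ definition above) =====
theorem find_optimized_cuts_spec : Claim_equal_find_optimized_cuts := by
  intro max sizes _ hpre
  obtain ⟨hne, -⟩ := hpre
  unfold Spec_find_optimized_cuts
  match sizes, hne with
  | s :: rest, _ =>
    rw [find_optimized_cuts_alt]
    have hslice : PySem.List.slice (s :: rest) none (some (-1)) = (s :: rest).dropLast := by
      rw [show ((-1 : Int)) = -((1 : Nat) : Int) by norm_num,
        PySem.List.slice_to_neg_natCast (s :: rest) 1 (by norm_num)]
      simp [List.dropLast_eq_take]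
    have hlast : PySem.List.pyGetD (s :: rest) (-1) 0 = (s :: rest).getLast (by simp) :=
      PySem.List.pyGetD_neg_one (s :: rest) 0 (by simp)
    simp only [hslice, hlast]
    rw [pvStep_key ((s :: rest).dropLast) ((s :: rest).getLast (by simp)) [(max, [])]]
    rw [List.dropLast_append_getLast]
    simp [List.flatMap]
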